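-- pv_equiv track=rewrite | github.com/c7nw3r/aikido | aikido/__api__/trait/file_trait.py | generate_tok_to_ch_map
-- ===== SOURCE A (Python) =====
-- import string
--
-- def generate_tok_to_ch_map(text):
--     """ Generates a mapping from token to character index when a string text is split using .split()
--     TODO e.g."""
--     map = [0]
--     follows_whitespace = False
--     for i, ch in enumerate(text):
--         if follows_whitespace:
--             if ch not in string.whitespace:
--                 map.append(i)
--                 follows_whitespace = False
--         else:
--             if ch in string.whitespace:
--                 follows_whitespace = True
--     return map
-- ===== SOURCE B (Python) =====
-- import string
--
-- def generate_tok_to_ch_map(text):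
--     ws = set(string.whitespace)
--     return [0] + [i for i, (prev, ch) in enumerate(zip(text, text[1:]), 1)
--                   if prev in ws and ch not in ws]
-- ===== Notes on version B (the rewrite author's own statement) =====
-- stated objective: idiomatic
-- what changed: Replaces the stateful follows_whitespace char-by-char state machine with a single pairwise comprehension over zip(text, text[1:]): a token start is exactly an index whose predecessor is whitespace and which is not, seeded with the unconditional 0.
import Mathlib
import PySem

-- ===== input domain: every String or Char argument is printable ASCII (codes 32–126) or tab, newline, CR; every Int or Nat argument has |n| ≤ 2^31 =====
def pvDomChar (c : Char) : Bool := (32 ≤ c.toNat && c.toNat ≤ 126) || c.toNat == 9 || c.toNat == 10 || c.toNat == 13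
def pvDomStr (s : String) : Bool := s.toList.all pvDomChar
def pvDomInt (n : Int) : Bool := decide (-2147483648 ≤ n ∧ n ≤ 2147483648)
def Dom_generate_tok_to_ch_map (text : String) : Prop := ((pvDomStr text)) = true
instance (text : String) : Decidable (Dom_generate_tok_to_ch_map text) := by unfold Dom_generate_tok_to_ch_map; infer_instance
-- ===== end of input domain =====

-- B replaces A's follows_whitespace state machine by one pairwise comprehension over
-- zip(text, text[1:]) (idiomatic; same O(n) cost).

-- string.whitespace = ' \t\n\r\x0b\x0c' (shared by both ports: both test membership in string.whitespace)
def pyWhitespace : List Char := [' ', '\t', '\n', '\r', Char.ofNat 11, Char.ofNat 12]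

-- ===== PORT A =====
-- loop body of A: state = (map, follows_whitespace), element = (i, ch)
def tokStepA (st : List Int × Bool) (p : Int × Char) : List Int × Bool :=
  if st.2 then
    if !(pyWhitespace.contains p.2) then (st.1 ++ [p.1], false) else st
  else
    if pyWhitespace.contains p.2 then (st.1, true) else st

def generate_tok_to_ch_map (text : String) : List Int :=
  ((PySem.List.enumerate text.toList 0).foldl tokStepA ([0], false)).1

-- ===== PORT B =====
-- comprehension body of B: p = (i, (prev, ch)); keep i when prev is whitespace and ch is not
def tokKeepB (p : Int × (Char × Char)) : Option Int :=
  if pyWhitespace.contains p.2.1 && !pyWhitespace.contains p.2.2 then some p.1 else none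

def generate_tok_to_ch_map_alt (text : String) : List Int :=
  let cs := text.toList
  0 :: ((PySem.List.enumerate (cs.zip (PySem.List.slice cs (some 1) none)) 1).filterMap tokKeepB)

-- ===== PRECONDITION & SPEC =====
def Spec_generate_tok_to_ch_map (text : String) (out : List Int) : Prop := out = generate_tok_to_ch_map_alt text
instance (text : String) (out : List Int) : Decidable (Spec_generate_tok_to_ch_map text out) := by unfold Spec_generate_tok_to_ch_map; infer_instance

-- ===== CLAIM (what is proved, stated in full; the proofs are below) =====
def Claim_equal_generate_tok_to_ch_map : Prop := ∀ (text : String), Dom_generate_tok_to_ch_map text → Spec_generate_tok_to_ch_map text (generate_tok_to_ch_map text)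

-- ===== LEMMAS AND PROOFS =====

-- common characterisation: the token starts emitted while scanning cs with flag fw from index i
def tokStarts : List Char → Bool → Int → List Int
  | [], _, _ => []
  | c :: rest, fw, i =>
    if fw && !pyWhitespace.contains c then i :: tokStarts rest (pyWhitespace.contains c) (i + 1)
    else tokStarts rest (pyWhitespace.contains c) (i + 1)

theorem foldA_eq (cs : List Char) : ∀ (i : Int) (acc : List Int) (fw : Bool),
    ((PySem.List.enumerate cs i).foldl tokStepA (acc, fw)).1 = acc ++ tokStarts cs fw i := by
  induction cs with
  | nil => intro i acc fw; simp [PySem.List.enumerate_nil, tokStarts]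
  | cons c rest ih =>
    intro i acc fw
    rw [PySem.List.enumerate_cons]
    by_cases hw : c ∈ pyWhitespace <;> cases fw <;>
      simp [tokStepA, tokStarts, hw, ih]

theorem filterB_eq (rest : List Char) : ∀ (prev : Char) (i : Int),
    (PySem.List.enumerate ((prev :: rest).zip rest) i).filterMap tokKeepB
      = tokStarts rest (pyWhitespace.contains prev) i := by
  induction rest with
  | nil => intro prev i; simp [PySem.List.enumerate_nil, tokStarts]
  | cons c rs ih =>
    intro prev i
    rw [show (prev :: c :: rs).zip (c :: rs) = (prev, c) :: (c :: rs).zip rs from rfl,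
        PySem.List.enumerate_cons]
    have ih' := ih c (i + 1)
    by_cases hp : prev ∈ pyWhitespace <;>
      by_cases hc : c ∈ pyWhitespace <;>
        simp [tokKeepB, tokStarts, List.contains_eq_mem, hp, hc] at ih' ⊢ <;>
          exact ih'

-- ===== VERDICT (by name: the statement is the Claim_ definition above) =====
theorem generate_tok_to_ch_map_spec : Claim_equal_generate_tok_to_ch_map := by
  intro text _
  unfold Spec_generate_tok_to_ch_map
  simp only [generate_tok_to_ch_map, generate_tok_to_ch_map_alt, PySem.List.slice_from_one]
  cases h : text.toList with
  | nil => simp [PySem.List.enumerate_nil]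
  | cons c rest =>
    rw [foldA_eq]
    show 0 :: tokStarts (c :: rest) false 0
        = 0 :: (PySem.List.enumerate ((c :: rest).zip rest) 1).filterMap tokKeepB
    rw [filterB_eq]
    simp [tokStarts]
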